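-- pv_equiv track=rewrite | github.com/glass-dev/glass.ext.cli | glass/ext/cli/plot.py | split_bins
-- ===== SOURCE A (Python) =====
-- def split_bins(a):
--     s = []
--     i, j = 0, 0
--     while i < len(a):
--         j += 1
--         s.append(a[i:i+j])
--         i += j
--     return s
-- ===== SOURCE B (Python) =====
-- def _isqrt(n):
--     # integer square root by Newton's method (floor sqrt)
--     if n == 0:
--         return 0
--     x = 1 << ((n.bit_length() + 1) // 2)
--     while True:
--         y = (x + n // x) // 2
--         if y >= x:
--             return x
--         x = y
--
--
-- def split_bins(a):
--     n = len(a)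
--     # m = smallest integer with m*(m+1)/2 >= n: the number of chunks
--     m = (_isqrt(8 * n) + 1) // 2
--     return [a[k * (k + 1) // 2 : k * (k + 1) // 2 + k + 1] for k in range(m)]
-- ===== Notes on version B (the rewrite author's own statement) =====
-- stated objective: alternative
-- what changed: B computes the number of chunks m in closed form via an integer square root (Newton's method) and builds every chunk by slicing at triangular-number offsets in a comprehension, instead of threading i,j accumulators through a while loop.
import Mathlib
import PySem

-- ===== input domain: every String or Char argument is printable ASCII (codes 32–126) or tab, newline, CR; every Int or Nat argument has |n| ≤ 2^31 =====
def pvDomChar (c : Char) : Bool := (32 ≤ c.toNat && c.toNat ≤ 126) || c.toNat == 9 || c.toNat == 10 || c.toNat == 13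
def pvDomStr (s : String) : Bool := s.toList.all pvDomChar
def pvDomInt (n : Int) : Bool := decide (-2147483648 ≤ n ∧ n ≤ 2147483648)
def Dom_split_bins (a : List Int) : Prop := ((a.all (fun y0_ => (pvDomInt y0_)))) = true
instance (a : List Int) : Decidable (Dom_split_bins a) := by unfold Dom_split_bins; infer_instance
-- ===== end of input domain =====

-- B replaces A's i,j while-loop with a closed-form chunk count (integer sqrt via Newton) and triangular-number slicing: an alternative decomposition of the same O(n) task.


-- ===== PORT A =====
-- while i < len(a): j += 1; s.append(a[i:i+j]); i += j
def splitBinsLoop (a : List Int) (i j : Nat) (s : List (List Int)) : List (List Int) :=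
  if _h : i < a.length then
    splitBinsLoop a (i + (j + 1)) (j + 1)
      (s ++ [PySem.List.slice a (some (i : Int)) (some ((i + (j + 1) : Nat) : Int))])
  else s
termination_by a.length - i
decreasing_by omega

def split_bins (a : List Int) : List (List Int) :=
  splitBinsLoop a 0 0 []

-- ===== PORT B =====
-- _isqrt: Newton's method loop from Source B
def newtonLoop (n x : Nat) : Nat :=
  let y := (x + n / x) / 2
  if _h : y ≥ x then x else newtonLoop n y
termination_by x
decreasing_by omega

-- _isqrt(n): 0 for n == 0, else Newton from initial guess 1 << ((n.bit_length() + 1) // 2);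
-- for n ≥ 1, n.bit_length() = Nat.log2 n + 1
def pyIsqrt (n : Nat) : Nat :=
  if n = 0 then 0 else newtonLoop n (1 <<< ((Nat.log2 n + 1 + 1) / 2))

def split_bins_alt (a : List Int) : List (List Int) :=
  let n := a.length
  let m := (pyIsqrt (8 * n) + 1) / 2
  (List.range m).map (fun k =>
    PySem.List.slice a (some ((k * (k + 1) / 2 : Nat) : Int))
      (some ((k * (k + 1) / 2 + (k + 1) : Nat) : Int)))

-- ===== PRECONDITION & SPEC =====
def Spec_split_bins (a : List Int) (out : List (List Int)) : Prop := out = split_bins_alt a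
instance (a : List Int) (out : List (List Int)) : Decidable (Spec_split_bins a out) := by unfold Spec_split_bins; infer_instance

-- ===== CLAIM (what is proved, stated in full; the proofs are below) =====
def Claim_equal_split_bins : Prop := ∀ (a : List Int), Dom_split_bins a → Spec_split_bins a (split_bins a)

-- ===== LEMMAS AND PROOFS =====
theorem newtonLoop_eq_iter (n : Nat) : ∀ x, newtonLoop n x = Nat.sqrt.iter n x := by
  intro x
  induction x using Nat.strong_induction_on with
  | _ x ih =>
    rw [newtonLoop, Nat.sqrt.iter]
    by_cases h : (x + n / x) / 2 ≥ x
    · simp only [h, dite_true, dif_neg (by omega : ¬ (x + n / x) / 2 < x)]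
    · simp only [h, dite_false, dif_pos (by omega : (x + n / x) / 2 < x)]
      exact ih _ (by omega)

theorem pyIsqrt_eq (n : Nat) : pyIsqrt n = Nat.sqrt n := by
  unfold pyIsqrt
  by_cases h0 : n = 0
  · simp [h0]
  · simp only [h0, if_false]
    rw [newtonLoop_eq_iter]
    set g := 1 <<< ((Nat.log2 n + 1 + 1) / 2) with hg
    have hgpow : g = 2 ^ ((Nat.log2 n + 1 + 1) / 2) := by
      rw [hg, Nat.shiftLeft_eq, Nat.one_mul]
    have hbound : n < (g + 1) * (g + 1) := by
      have h1 : n < 2 ^ (Nat.log2 n + 1) := Nat.lt_log2_self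
      have h2 : 2 ^ (Nat.log2 n + 1) ≤ g * g := by
        rw [hgpow, ← Nat.pow_add]
        exact Nat.pow_le_pow_right (by omega) (by omega)
      have : g * g ≤ (g + 1) * (g + 1) :=
        Nat.mul_le_mul (by omega) (by omega)
      omega
    exact Nat.eq_sqrt.mpr ⟨Nat.sqrt.iter_sq_le n g, Nat.sqrt.lt_iter_succ_sq n g hbound⟩

theorem tri_lt_iff (n j : Nat) : j < (Nat.sqrt (8 * n) + 1) / 2 ↔ j * (j + 1) / 2 < n := by
  have he : 2 * (j * (j + 1) / 2) = j * (j + 1) :=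
    Nat.two_mul_div_two_of_even (Nat.even_mul_succ_self j)
  have hexp : j * (j + 1) = j * j + j := by ring
  have hsq : (2 * j + 1) * (2 * j + 1) = 4 * (j * j) + 4 * j + 1 := by ring
  constructor
  · intro h
    have h1 : 2 * j + 1 ≤ Nat.sqrt (8 * n) := by omega
    have h2 : (2 * j + 1) * (2 * j + 1) ≤ 8 * n := Nat.le_sqrt.mp h1
    omega
  · intro h
    have h2 : (2 * j + 1) * (2 * j + 1) ≤ 8 * n := by omega
    have h1 : 2 * j + 1 ≤ Nat.sqrt (8 * n) := Nat.le_sqrt.mpr h2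
    omega

theorem splitBinsLoop_eq (a : List Int) :
    ∀ (c j : Nat) (s : List (List Int)),
      (pyIsqrt (8 * a.length) + 1) / 2 - j ≤ c →
      splitBinsLoop a (j * (j + 1) / 2) j s =
        s ++ (List.range' j ((pyIsqrt (8 * a.length) + 1) / 2 - j)).map (fun k =>
          PySem.List.slice a (some ((k * (k + 1) / 2 : Nat) : Int))
            (some ((k * (k + 1) / 2 + (k + 1) : Nat) : Int))) := by
  intro c
  induction c with
  | zero =>
    intro j s hc
    have hm : ¬ j < (pyIsqrt (8 * a.length) + 1) / 2 := by omega
    rw [pyIsqrt_eq] at hm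
    have hstop : ¬ j * (j + 1) / 2 < a.length := fun h => hm ((tri_lt_iff a.length j).mpr h)
    rw [splitBinsLoop, dif_neg hstop]
    have : (pyIsqrt (8 * a.length) + 1) / 2 - j = 0 := by omega
    simp [this]
  | succ c ih =>
    intro j s hc
    by_cases hm : j < (pyIsqrt (8 * a.length) + 1) / 2
    · have hlt : j * (j + 1) / 2 < a.length := by
        have := (tri_lt_iff a.length j).mp (by rwa [← pyIsqrt_eq])
        exact this
      rw [splitBinsLoop, dif_pos hlt]
      have htri : j * (j + 1) / 2 + (j + 1) = (j + 1) * ((j + 1) + 1) / 2 := by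
        have h1 : 2 * (j * (j + 1) / 2) = j * (j + 1) :=
          Nat.two_mul_div_two_of_even (Nat.even_mul_succ_self j)
        have h2 : 2 * ((j + 1) * (j + 1 + 1) / 2) = (j + 1) * (j + 1 + 1) :=
          Nat.two_mul_div_two_of_even (Nat.even_mul_succ_self (j + 1))
        have h3 : (j + 1) * (j + 1 + 1) = j * (j + 1) + 2 * (j + 1) := by ring
        omega
      rw [htri]
      rw [ih (j + 1) _ (by omega)]
      have hrange : (pyIsqrt (8 * a.length) + 1) / 2 - j =
          ((pyIsqrt (8 * a.length) + 1) / 2 - (j + 1)) + 1 := by omega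
      rw [hrange, List.range'_succ, List.map_cons, List.append_assoc]
      rw [← htri]
      simp
    · have hstop : ¬ j * (j + 1) / 2 < a.length := by
        intro h
        exact hm (by rw [pyIsqrt_eq]; exact (tri_lt_iff a.length j).mpr h)
      rw [splitBinsLoop, dif_neg hstop]
      have : (pyIsqrt (8 * a.length) + 1) / 2 - j = 0 := by omega
      simp [this]

-- ===== VERDICT (by name: the statement is the Claim_ definition above) =====
theorem split_bins_spec : Claim_equal_split_bins := by
  intro a _
  unfold Spec_split_bins split_bins split_bins_alt
  have h := splitBinsLoop_eq a ((pyIsqrt (8 * a.length) + 1) / 2) 0 [] (by omega)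
  simp only [Nat.zero_mul, Nat.zero_div, Nat.sub_zero] at h
  simpa [List.range_eq_range'] using h
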